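-- pv_equiv track=rewrite | github.com/IGS/FADU | fadu.v2.py | determine_pair_inserts_overlaps
-- ===== SOURCE A (Python) =====
-- def determine_pair_inserts_overlaps(coords_list):
--     """Keep track of all paired read fragment inserts and overlaps per read pair coordinates."""
--     coords_list = [int(i) for i in coords_list]
--     (r1start, r1end, r2start, r2end) = coords_list
--     # Final coord is not included in range, so adjust by 1
--     r1end = r1end+1
--     r2end = r2end+1
--     min_coord = min(r1start, r2start, r1end, r2end)
--     max_coord = max(r1start, r2start, r1end, r2end)
--     r1_range = set(range(r1start, r1end))
--     r2_range = set(range(r2start, r2end))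
--     combined_range = set(range(min_coord, max_coord))
--     # Insert coords will not appear in either read
--     inserts = combined_range.difference(*(r1_range, r2_range))
--     # Overlapping coords will be common to both reads
--     overlaps = r1_range.intersection(r2_range)
--     return (inserts, overlaps)
-- ===== SOURCE B (Python) =====
-- def determine_pair_inserts_overlaps(coords_list):
--     """Keep track of all paired read fragment inserts and overlaps per read pair coordinates."""
--     (r1start, r1end, r2start, r2end) = [int(i) for i in coords_list]
--     # Final coord is not included in range, so adjust by 1
--     r1end = r1end + 1
--     r2end = r2end + 1
--     lo = min(r1start, r2start, r1end, r2end)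
--     hi = max(r1start, r2start, r1end, r2end)
--     inserts = set()
--     overlaps = set()
--     for i in range(lo, hi):
--         in1 = r1start <= i < r1end
--         in2 = r2start <= i < r2end
--         if in1 and in2:
--             overlaps.add(i)
--         elif not in1 and not in2:
--             inserts.add(i)
--     return (inserts, overlaps)
-- ===== Notes on version B (the rewrite author's own statement) =====
-- stated objective: alternative
-- what changed: Replaces the three materialised range-sets and the set difference/intersection with a single pass over range(min,max) that classifies each coordinate by interval membership tests, so no intermediate sets are built.
import Mathlib
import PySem

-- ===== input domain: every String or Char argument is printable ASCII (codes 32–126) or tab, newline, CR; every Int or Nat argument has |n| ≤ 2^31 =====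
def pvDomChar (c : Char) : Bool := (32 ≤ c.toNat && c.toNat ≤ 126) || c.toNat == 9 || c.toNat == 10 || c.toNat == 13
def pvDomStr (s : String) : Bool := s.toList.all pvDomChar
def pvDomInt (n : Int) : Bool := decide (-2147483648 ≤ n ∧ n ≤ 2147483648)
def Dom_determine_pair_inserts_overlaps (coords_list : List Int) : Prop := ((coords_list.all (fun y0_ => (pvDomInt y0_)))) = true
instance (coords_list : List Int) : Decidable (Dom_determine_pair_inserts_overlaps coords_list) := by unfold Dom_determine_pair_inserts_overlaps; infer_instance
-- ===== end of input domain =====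

-- B computes inserts and overlaps in one pass over range(min,max) with interval
-- membership tests instead of building three range-sets and taking set difference/intersection.

-- ===== PORT A =====
def determine_pair_inserts_overlaps (coords_list : List Int) : List Int × List Int :=
  let cl := coords_list.map (fun i => i)   -- [int(i) for i in coords_list]
  match cl with
  | [r1start, r1end0, r2start, r2end0] =>
    let r1end := r1end0 + 1
    let r2end := r2end0 + 1
    let min_coord := min (min (min r1start r2start) r1end) r2end
    let max_coord := max (max (max r1start r2start) r1end) r2end
    let r1_range : PySem.Set Int := PySem.Set.ofList (PySem.List.pyRange r1start r1end 1)
    let r2_range : PySem.Set Int := PySem.Set.ofList (PySem.List.pyRange r2start r2end 1)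
    let combined_range : PySem.Set Int := PySem.Set.ofList (PySem.List.pyRange min_coord max_coord 1)
    let inserts := PySem.Set.diff (PySem.Set.diff combined_range r1_range) r2_range
    let overlaps := PySem.Set.inter r1_range r2_range
    (inserts, overlaps)
  | _ => ([], [])   -- unreachable under Pre_ (Python raises ValueError on unpack)

-- ===== PORT B =====
def determine_pair_inserts_overlaps_alt (coords_list : List Int) : List Int × List Int :=
  let cl := coords_list.map (fun i => i)
  if cl.length = 4 then
    let r1start := PySem.List.pyGetD cl 0 0
    let r1end0  := PySem.List.pyGetD cl 1 0
    let r2start := PySem.List.pyGetD cl 2 0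
    let r2end0  := PySem.List.pyGetD cl 3 0
    let r1end := r1end0 + 1
    let r2end := r2end0 + 1
    let lo := min (min (min r1start r2start) r1end) r2end
    let hi := max (max (max r1start r2start) r1end) r2end
    (PySem.List.pyRange lo hi 1).foldl
      (fun (s : PySem.Set Int × PySem.Set Int) i =>
        let in1 := decide (r1start ≤ i) && decide (i < r1end)
        let in2 := decide (r2start ≤ i) && decide (i < r2end)
        if in1 && in2 then (s.1, PySem.Set.add s.2 i)
        else if !in1 && !in2 then (PySem.Set.add s.1 i, s.2)
        else s)
      (PySem.Set.empty, PySem.Set.empty)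
  else ([], [])   -- unreachable under Pre_ (Python raises ValueError on unpack)

-- ===== PRECONDITION & SPEC =====
-- Python A raises ValueError (tuple unpacking) unless coords_list has exactly 4 elements.
def Pre_determine_pair_inserts_overlaps (coords_list : List Int) : Prop :=
  coords_list.length = 4
instance (coords_list : List Int) : Decidable (Pre_determine_pair_inserts_overlaps coords_list) := by
  unfold Pre_determine_pair_inserts_overlaps; infer_instance

def pvWitness_determine_pair_inserts_overlaps : List Int := [1, 5, 3, 8]

def Spec_determine_pair_inserts_overlaps (coords_list : List Int) (out : List Int × List Int) : Prop :=
  out = determine_pair_inserts_overlaps_alt coords_list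
instance (coords_list : List Int) (out : List Int × List Int) : Decidable (Spec_determine_pair_inserts_overlaps coords_list out) := by
  unfold Spec_determine_pair_inserts_overlaps; infer_instance

-- ===== CLAIM (what is proved, stated in full; the proofs are below) =====
def Claim_equal_determine_pair_inserts_overlaps : Prop :=
  ∀ (coords_list : List Int), Dom_determine_pair_inserts_overlaps coords_list →
    Pre_determine_pair_inserts_overlaps coords_list →
    Spec_determine_pair_inserts_overlaps coords_list (determine_pair_inserts_overlaps coords_list)

-- ===== LEMMAS AND PROOFS =====

-- Membership in range(s, e) (as a list) is the interval test.
theorem contains_range' (s e x : Int) :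
    PySem.Set.contains (PySem.List.pyRange s e 1) x
      = (decide (s ≤ x) && decide (x < e)) := by
  rw [Bool.eq_iff_iff]
  simp [PySem.List.mem_pyRange_one]

-- Membership in set(range(s, e)) is the interval test.
theorem contains_range (s e x : Int) :
    PySem.Set.contains (PySem.Set.ofList (PySem.List.pyRange s e 1)) x
      = (decide (s ≤ x) && decide (x < e)) := by
  rw [Bool.eq_iff_iff]
  simp [PySem.Set.mem_ofList, PySem.List.mem_pyRange_one]

-- B's loop over a nodup list of fresh elements appends the two filters to the accumulators.
theorem loop_filter (p q : Int → Bool) (l : List Int) (ins ov : List Int)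
    (hnd : l.Nodup) (hins : ∀ x ∈ l, x ∉ ins) (hov : ∀ x ∈ l, x ∉ ov) :
    l.foldl
      (fun (s : PySem.Set Int × PySem.Set Int) i =>
        if q i then (s.1, PySem.Set.add s.2 i)
        else if p i then (PySem.Set.add s.1 i, s.2)
        else s) (ins, ov)
    = (ins ++ l.filter (fun i => !q i && p i), ov ++ l.filter q) := by
  induction l generalizing ins ov with
  | nil => simp
  | cons a l ih =>
    have hnd' := (List.nodup_cons.mp hnd).2
    have hna := (List.nodup_cons.mp hnd).1
    simp only [List.foldl_cons]
    by_cases hq : q a = true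
    · rw [show (if q a then ((ins, ov).1, PySem.Set.add (ins, ov).2 a)
          else if p a then (PySem.Set.add (ins, ov).1 a, (ins, ov).2) else (ins, ov))
          = (ins, PySem.Set.add ov a) by simp [hq]]
      rw [PySem.Set.add_of_not_mem (hov a (List.mem_cons_self))]
      rw [ih _ _ hnd' (fun x hx => hins x (List.mem_cons_of_mem _ hx))
        (fun x hx => by simp; exact ⟨hov x (List.mem_cons_of_mem _ hx), fun h => hna (h ▸ hx)⟩)]
      simp [hq]
    · by_cases hp : p a = true
      · rw [show (if q a then ((ins, ov).1, PySem.Set.add (ins, ov).2 a)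
            else if p a then (PySem.Set.add (ins, ov).1 a, (ins, ov).2) else (ins, ov))
            = (PySem.Set.add ins a, ov) by simp [hq, hp]]
        rw [PySem.Set.add_of_not_mem (hins a (List.mem_cons_self))]
        rw [ih _ _ hnd' (fun x hx => by simp; exact ⟨hins x (List.mem_cons_of_mem _ hx), fun h => hna (h ▸ hx)⟩)
          (fun x hx => hov x (List.mem_cons_of_mem _ hx))]
        simp [hq, hp]
      · rw [show (if q a then ((ins, ov).1, PySem.Set.add (ins, ov).2 a)
            else if p a then (PySem.Set.add (ins, ov).1 a, (ins, ov).2) else (ins, ov))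
            = (ins, ov) by simp [hq, hp]]
        rw [ih _ _ hnd' (fun x hx => hins x (List.mem_cons_of_mem _ hx))
          (fun x hx => hov x (List.mem_cons_of_mem _ hx))]
        simp [hq, hp]

-- A's inserts (two set differences over the combined range) = the single-pass filter.
theorem inserts_eq (a b c d : Int) :
    PySem.Set.diff (PySem.Set.diff
        (PySem.Set.ofList (PySem.List.pyRange (min (min (min a c) (b+1)) (d+1)) (max (max (max a c) (b+1)) (d+1)) 1))
        (PySem.Set.ofList (PySem.List.pyRange a (b+1) 1)))
        (PySem.Set.ofList (PySem.List.pyRange c (d+1) 1))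
      = (PySem.List.pyRange (min (min (min a c) (b+1)) (d+1)) (max (max (max a c) (b+1)) (d+1)) 1).filter
          (fun i => !((decide (a ≤ i) && decide (i < b+1)) && (decide (c ≤ i) && decide (i < d+1)))
                    && (!(decide (a ≤ i) && decide (i < b+1)) && !(decide (c ≤ i) && decide (i < d+1)))) := by
  have hdiff : ∀ (s t : PySem.Set Int),
      PySem.Set.diff s t = s.filter (fun x => !(PySem.Set.contains t x)) := fun _ _ => rfl
  rw [PySem.Set.ofList_eq_self_of_nodup (PySem.List.pyRange a (b+1) 1) (PySem.List.nodup_pyRange_one _ _),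
    PySem.Set.ofList_eq_self_of_nodup (PySem.List.pyRange c (d+1) 1) (PySem.List.nodup_pyRange_one _ _),
    PySem.Set.ofList_eq_self_of_nodup (PySem.List.pyRange (min (min (min a c) (b+1)) (d+1)) (max (max (max a c) (b+1)) (d+1)) 1) (PySem.List.nodup_pyRange_one _ _),
    hdiff, hdiff, List.filter_filter]
  refine List.filter_congr fun i _ => ?_
  rw [contains_range', contains_range']
  cases h1 : decide (a ≤ i) <;> cases h2 : decide (i < b+1) <;>
    cases h3 : decide (c ≤ i) <;> cases h4 : decide (i < d+1) <;> rfl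

-- A's overlaps (intersection of the two read ranges) = the single-pass filter.
theorem overlaps_eq (a b c d : Int) :
    PySem.Set.inter (PySem.Set.ofList (PySem.List.pyRange a (b+1) 1))
        (PySem.Set.ofList (PySem.List.pyRange c (d+1) 1))
      = (PySem.List.pyRange (min (min (min a c) (b+1)) (d+1)) (max (max (max a c) (b+1)) (d+1)) 1).filter
          (fun i => (decide (a ≤ i) && decide (i < b+1)) && (decide (c ≤ i) && decide (i < d+1))) := by
  have hinter : ∀ (s t : PySem.Set Int),
      PySem.Set.inter s t = s.filter (fun x => PySem.Set.contains t x) := fun _ _ => rfl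
  rw [hinter, PySem.Set.ofList_eq_self_of_nodup _ (PySem.List.nodup_pyRange_one a (b+1))]
  set r1e := b + 1 with hr1e
  set r2e := d + 1 with hr2e
  set lo := min (min (min a c) r1e) r2e with hlo
  set hi := max (max (max a c) r1e) r2e with hhi
  have h1 : lo ≤ a := by omega
  have h2 : r1e ≤ hi := by omega
  rcases le_or_gt a r1e with h | h
  · rw [PySem.List.pyRange_one_append lo a hi h1 (le_trans h h2),
        PySem.List.pyRange_one_append a r1e hi h h2,
        List.filter_append, List.filter_append]
    rw [show (PySem.List.pyRange lo a 1).filter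
          (fun i => (decide (a ≤ i) && decide (i < r1e)) && (decide (c ≤ i) && decide (i < r2e))) = []
        from List.filter_eq_nil_iff.mpr (fun i hi => by
          rw [PySem.List.mem_pyRange_one] at hi; simp; omega)]
    rw [show (PySem.List.pyRange r1e hi 1).filter
          (fun i => (decide (a ≤ i) && decide (i < r1e)) && (decide (c ≤ i) && decide (i < r2e))) = []
        from List.filter_eq_nil_iff.mpr (fun i hi => by
          rw [PySem.List.mem_pyRange_one] at hi; simp; omega)]
    simp only [List.nil_append, List.append_nil]
    refine List.filter_congr (fun i hi => ?_)
    rw [PySem.List.mem_pyRange_one] at hi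
    rw [contains_range]
    simp only [decide_eq_true (hi.1), decide_eq_true (hi.2), Bool.true_and, Bool.and_true]
  · rw [PySem.List.pyRange_one_eq_nil h.le]
    symm
    exact List.filter_eq_nil_iff.mpr (fun i hi => by simp; omega)

-- ===== VERDICT (by name: the statement is the Claim_ definition above) =====
theorem determine_pair_inserts_overlaps_spec : Claim_equal_determine_pair_inserts_overlaps := by
  intro coords_list _ hpre
  unfold Pre_determine_pair_inserts_overlaps at hpre
  unfold Spec_determine_pair_inserts_overlaps
  rcases coords_list with _ | ⟨a, _ | ⟨b, _ | ⟨c, _ | ⟨d, _ | ⟨e, t⟩⟩⟩⟩⟩ <;>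
    simp only [List.length_cons, List.length_nil] at hpre <;> try omega
  unfold determine_pair_inserts_overlaps determine_pair_inserts_overlaps_alt
  simp only [List.map]
  have g0 : PySem.List.pyGetD [a, b, c, d] 0 0 = a := rfl
  have g1 : PySem.List.pyGetD [a, b, c, d] 1 0 = b := rfl
  have g2 : PySem.List.pyGetD [a, b, c, d] 2 0 = c := rfl
  have g3 : PySem.List.pyGetD [a, b, c, d] 3 0 = d := rfl
  rw [if_pos (show ([a, b, c, d] : List Int).length = 4 by simp)]
  simp only [g0, g1, g2, g3]
  rw [loop_filter
        (fun i => !(decide (a ≤ i) && decide (i < b+1)) && !(decide (c ≤ i) && decide (i < d+1)))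
        (fun i => (decide (a ≤ i) && decide (i < b+1)) && (decide (c ≤ i) && decide (i < d+1)))
        _ PySem.Set.empty PySem.Set.empty (PySem.List.nodup_pyRange_one _ _)
        (by intro x _; simp [PySem.Set.empty]) (by intro x _; simp [PySem.Set.empty])]
  rw [show (PySem.Set.empty : PySem.Set Int) = [] from rfl, List.nil_append, List.nil_append]
  exact Prod.ext (inserts_eq a b c d) (overlaps_eq a b c d)
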